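-- pv_equiv track=rewrite | github.com/MilanCalegari/RosalindSolutions | PythonSolutions/consensus.py | matrix_l2r
-- ===== SOURCE A (Python) =====
-- def matrix_l2r(matrix):
--     line_A = ['A:']
--     line_C = ['C:']
--     line_G = ['G:']
--     line_T = ['T:']
--
--     for i in range(len(matrix)):
--         line_A.append(str(matrix[i][0]))
--         line_C.append(str(matrix[i][1]))
--         line_G.append(str(matrix[i][2]))
--         line_T.append(str(matrix[i][3]))
--
--     line_A.append('\n')
--     line_C.append('\n')
--     line_G.append('\n')
--
--     final = ' '.join(line_A) + ' '.join(line_C) + ' '.join(line_G) + ' '.join(line_T)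
--
--     return final
-- ===== SOURCE B (Python) =====
-- def matrix_l2r(matrix):
--     # Column-major: build each nucleotide line in one scan of the matrix.
--     def column_line(label, i):
--         return ' '.join([label] + [str(matrix[j][i]) for j in range(len(matrix))])
--     a = column_line('A:', 0)
--     c = column_line('C:', 1)
--     g = column_line('G:', 2)
--     t = column_line('T:', 3)
--     # the source format puts a space before each newline and none after the T line
--     return a + ' \n' + c + ' \n' + g + ' \n' + t
-- ===== Notes on version B (the rewrite author's own statement) =====
-- stated objective: idiomatic
-- what changed: B traverses column-by-column, building each of the four lines with a single join over a comprehension, instead of A's row-major interleaved pass that appends to four accumulator lists.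
import Mathlib
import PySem

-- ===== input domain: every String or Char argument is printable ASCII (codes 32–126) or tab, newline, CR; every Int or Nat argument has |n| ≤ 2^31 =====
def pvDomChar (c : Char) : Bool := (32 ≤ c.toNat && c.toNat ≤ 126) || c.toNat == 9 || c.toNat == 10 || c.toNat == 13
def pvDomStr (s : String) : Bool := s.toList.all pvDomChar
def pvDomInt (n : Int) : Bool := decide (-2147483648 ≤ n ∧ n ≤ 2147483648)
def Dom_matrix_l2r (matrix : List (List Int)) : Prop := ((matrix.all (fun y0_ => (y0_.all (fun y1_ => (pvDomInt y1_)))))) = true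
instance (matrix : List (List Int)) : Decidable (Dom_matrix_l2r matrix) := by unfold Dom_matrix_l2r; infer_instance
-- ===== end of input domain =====

-- B builds the four lines column-by-column (one join per nucleotide line) instead of A's
-- row-major pass that appends to four accumulator lists; return values proved equal on Pre_.

-- ===== PORT A =====
-- literal transliteration: four accumulator lists, one loop over row indices,
-- '\n' appended to the first three, then the four ' '.joins concatenated.
def matrix_l2r (matrix : List (List Int)) : String :=
  let st := (PySem.List.pyRange 0 (PySem.List.len matrix) 1).foldl
    (fun (acc : List String × List String × List String × List String) i =>
      let row := PySem.List.pyGetD matrix i []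
      (acc.1 ++ [PySem.Int.toStr (PySem.List.pyGetD row 0 0)],
       acc.2.1 ++ [PySem.Int.toStr (PySem.List.pyGetD row 1 0)],
       acc.2.2.1 ++ [PySem.Int.toStr (PySem.List.pyGetD row 2 0)],
       acc.2.2.2 ++ [PySem.Int.toStr (PySem.List.pyGetD row 3 0)]))
    (["A:"], ["C:"], ["G:"], ["T:"])
  PySem.Str.join " " (st.1 ++ ["\n"]) ++ PySem.Str.join " " (st.2.1 ++ ["\n"]) ++
    PySem.Str.join " " (st.2.2.1 ++ ["\n"]) ++ PySem.Str.join " " st.2.2.2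

-- ===== PORT B =====
-- helper = Source B's column_line: one ' '.join over label :: comprehension over row indices
def columnLine (matrix : List (List Int)) (label : String) (i : Int) : String :=
  PySem.Str.join " "
    (label :: (PySem.List.pyRange 0 (PySem.List.len matrix) 1).map
      (fun j => PySem.Int.toStr (PySem.List.pyGetD (PySem.List.pyGetD matrix j []) i 0)))

def matrix_l2r_alt (matrix : List (List Int)) : String :=
  let a := columnLine matrix "A:" 0
  let c := columnLine matrix "C:" 1
  let g := columnLine matrix "G:" 2
  let t := columnLine matrix "T:" 3
  a ++ " \n" ++ c ++ " \n" ++ g ++ " \n" ++ t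

-- ===== PRECONDITION & SPEC =====
-- Pre_ excludes exactly the matrices with a row of fewer than 4 entries, on which A raises IndexError.
def Pre_matrix_l2r (matrix : List (List Int)) : Prop := ∀ row ∈ matrix, 4 ≤ row.length
instance (matrix : List (List Int)) : Decidable (Pre_matrix_l2r matrix) := by unfold Pre_matrix_l2r; infer_instance
def pvWitness_matrix_l2r : List (List Int) := [[1, 2, 3, 4], [5, 6, 7, 8]]

def Spec_matrix_l2r (matrix : List (List Int)) (out : String) : Prop := out = matrix_l2r_alt matrix
instance (matrix : List (List Int)) (out : String) : Decidable (Spec_matrix_l2r matrix out) := by unfold Spec_matrix_l2r; infer_instance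

-- ===== CLAIM (what is proved, stated in full; the proofs are below) =====
def Claim_equal_matrix_l2r : Prop := ∀ (matrix : List (List Int)), Dom_matrix_l2r matrix → Pre_matrix_l2r matrix → Spec_matrix_l2r matrix (matrix_l2r matrix)

-- ===== LEMMAS AND PROOFS =====

-- A's loop: each accumulator list just collects its column's rendered entries.
theorem foldl_four_append (matrix : List (List Int))
    (a c g t : List String) :
    matrix.foldl
      (fun (acc : List String × List String × List String × List String) row =>
        (acc.1 ++ [PySem.Int.toStr (PySem.List.pyGetD row 0 0)],
         acc.2.1 ++ [PySem.Int.toStr (PySem.List.pyGetD row 1 0)],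
         acc.2.2.1 ++ [PySem.Int.toStr (PySem.List.pyGetD row 2 0)],
         acc.2.2.2 ++ [PySem.Int.toStr (PySem.List.pyGetD row 3 0)]))
      (a, c, g, t) =
      (a ++ matrix.map (fun row => PySem.Int.toStr (PySem.List.pyGetD row 0 0)),
       c ++ matrix.map (fun row => PySem.Int.toStr (PySem.List.pyGetD row 1 0)),
       g ++ matrix.map (fun row => PySem.Int.toStr (PySem.List.pyGetD row 2 0)),
       t ++ matrix.map (fun row => PySem.Int.toStr (PySem.List.pyGetD row 3 0))) := by
  induction matrix generalizing a c g t with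
  | nil => simp
  | cons r rs ih => simp [List.foldl_cons, ih]

-- joining with a trailing "\n" element = joining without it, then " \n"
theorem chars_join_append_newline (sep q : List Char) (p : List Char) (ps : List (List Char)) :
    PySem.Chars.join sep (p :: (ps ++ [q])) = PySem.Chars.join sep (p :: ps) ++ sep ++ q := by
  induction ps generalizing p with
  | nil => simp [PySem.Chars.join_cons_cons, PySem.Chars.join_singleton]
  | cons x xs ih =>
      rw [List.cons_append, PySem.Chars.join_cons_cons, ih x,
        PySem.Chars.join_cons_cons]
      simp

theorem str_join_append_newline (p : String) (ps : List String) :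
    PySem.Str.join " " (p :: (ps ++ ["\n"])) = PySem.Str.join " " (p :: ps) ++ " \n" := by
  apply String.toList_inj.mp
  simp only [String.toList_append, PySem.Str.toList_join, List.map_append, List.map_cons,
    List.map_nil]
  have := chars_join_append_newline " ".toList "\n".toList p.toList (ps.map String.toList)
  simpa using this

-- B's comprehension over indices = a map over the rows
theorem map_pyRange_rows (matrix : List (List Int)) (i : Int) :
    (PySem.List.pyRange 0 (PySem.List.len matrix) 1).map
        (fun j => PySem.Int.toStr (PySem.List.pyGetD (PySem.List.pyGetD matrix j []) i 0)) =
      matrix.map (fun row => PySem.Int.toStr (PySem.List.pyGetD row i 0)) := by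
  have h := PySem.List.map_pyGetD_pyRange_zero matrix ([] : List Int)
  conv_rhs => rw [← h]
  rw [List.map_map]
  rfl

-- ===== VERDICT (by name: the statement is the Claim_ definition above) =====
theorem matrix_l2r_spec : Claim_equal_matrix_l2r := by
  intro matrix _ _
  unfold Spec_matrix_l2r matrix_l2r matrix_l2r_alt columnLine
  rw [PySem.List.foldl_pyRange_zero_pyGetD matrix ([] : List Int)
      (fun (acc : List String × List String × List String × List String) row =>
        (acc.1 ++ [PySem.Int.toStr (PySem.List.pyGetD row 0 0)],
         acc.2.1 ++ [PySem.Int.toStr (PySem.List.pyGetD row 1 0)],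
         acc.2.2.1 ++ [PySem.Int.toStr (PySem.List.pyGetD row 2 0)],
         acc.2.2.2 ++ [PySem.Int.toStr (PySem.List.pyGetD row 3 0)]))
      (["A:"], ["C:"], ["G:"], ["T:"]),
    foldl_four_append, map_pyRange_rows, map_pyRange_rows, map_pyRange_rows, map_pyRange_rows]
  simp only [List.cons_append, List.nil_append]
  rw [str_join_append_newline, str_join_append_newline, str_join_append_newline]
  simp [String.append_assoc]
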